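-- pv_equiv track=rewrite | github.com/treefrog00/python-playground | advent-of-code-2019/day6.py | count_orbits
-- ===== SOURCE A (Python) =====
-- from collections import defaultdict
--
-- COM = "COM"
--
-- def build_tree(orbits):
--     tree = defaultdict(list)
--     for t1, t2 in orbits:
--         tree[t1].append(t2)
--     return tree
--
-- def count_orbits(lines):
--     tree = build_tree(lines)
--     current_level = [COM]
--     depth = 0
--     count = 0
--
--     while True:
--         count += len(current_level * depth)
--         current_level = [child for parent in current_level for child in tree[parent] if parent in tree]
--         depth += 1
--         if not current_level:
--             return count
-- ===== SOURCE B (Python) =====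
-- from collections import defaultdict
--
-- COM = "COM"
--
-- def build_tree(orbits):
--     tree = defaultdict(list)
--     for t1, t2 in orbits:
--         tree[t1].append(t2)
--     return tree
--
-- def count_orbits(lines):
--     tree = build_tree(lines)
--     count = 0
--     stack = [(COM, 0)]
--     while stack:
--         node, depth = stack.pop()
--         count += depth
--         for child in tree[node]:
--             stack.append((child, depth + 1))
--     return count
-- ===== Notes on version B (the rewrite author's own statement) =====
-- stated objective: alternative
-- what changed: Replaces the level-by-level BFS (rebuilding the whole next level each round and adding depth*len(level)) with an explicit-stack depth-first traversal that pops one (node, depth) pair at a time and accumulates each node's depth individually.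
import Mathlib
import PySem

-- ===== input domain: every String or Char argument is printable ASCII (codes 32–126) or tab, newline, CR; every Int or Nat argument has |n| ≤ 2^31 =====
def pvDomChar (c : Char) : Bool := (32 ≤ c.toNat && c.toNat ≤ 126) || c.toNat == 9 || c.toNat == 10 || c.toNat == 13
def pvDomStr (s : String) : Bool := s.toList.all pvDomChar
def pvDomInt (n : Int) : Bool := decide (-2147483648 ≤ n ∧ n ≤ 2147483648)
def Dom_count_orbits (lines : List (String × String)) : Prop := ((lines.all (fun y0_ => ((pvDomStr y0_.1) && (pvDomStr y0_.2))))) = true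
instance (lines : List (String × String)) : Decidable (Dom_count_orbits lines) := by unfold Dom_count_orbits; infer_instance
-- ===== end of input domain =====

-- B replaces A's level-by-level BFS with an explicit-stack depth-first traversal that pops one
-- (node, depth) pair at a time and sums the depths (alternative decomposition, no speed claim).

-- ===== PORT A =====
-- build_tree: defaultdict(list); tree[t1].append(t2) is d.modify t1 [] (· ++ [t2]).
def buildTree (orbits : List (String × String)) : PySem.Dict String (List String) :=
  orbits.foldl (fun d p => d.modify p.1 [] (fun l => l ++ [p.2])) PySem.Dict.empty

-- A's 'while True' loop, fueled: on every input satisfying Pre_ the loop performs at most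
-- lines.length + 2 iterations, far below the fuel (proved below), so the fuel-0 branch is
-- unreachable there.
-- The defaultdict access tree[parent] inside the comprehension only auto-inserts EMPTY entries
-- (invisible to every 'getD _ []'), so the dict is not threaded; the trailing
-- 'if parent in tree' guard of the comprehension is kept literally.
def bfsLoop (tree : PySem.Dict String (List String)) :
    Nat → List String → Int → Int → Int
  | 0, _, _, count => count
  | fuel + 1, level, depth, count =>
    let count' := count + depth * (level.length : Int)
    let next := level.flatMap (fun parent =>
      (tree.getD parent []).filter (fun _ => tree.contains parent))
    if next.isEmpty then count' else bfsLoop tree fuel next (depth + 1) count'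

def count_orbits (lines : List (String × String)) : Int :=
  bfsLoop (buildTree lines) ((lines.length + 2) ^ (lines.length + 2)) ["COM"] 0 0

-- ===== PORT B =====
-- B's 'while stack' loop, fueled likewise: under Pre_ the number of pops (one per orbit path
-- from COM) is at most (lines.length + 2) ^ (lines.length + 2) (proved below).
-- stack.pop() takes the LAST element; children are appended in list order.
def dfsLoop (tree : PySem.Dict String (List String)) :
    Nat → List (String × Int) → Int → Int
  | 0, _, count => count
  | fuel + 1, stack, count =>
    match stack.getLast? with
    | none => count
    | some (node, depth) =>
      dfsLoop tree fuel
        (stack.dropLast ++ (tree.getD node []).map (fun child => (child, depth + 1)))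
        (count + depth)

def count_orbits_alt (lines : List (String × String)) : Int :=
  dfsLoop (buildTree lines) ((lines.length + 2) ^ (lines.length + 2)) [("COM", 0)] 0

-- ===== PRECONDITION & SPEC =====
-- the set of objects reachable from the given set in one orbit step (deduplicated)
def orbitNext (lines : List (String × String)) (S : PySem.Set String) : PySem.Set String :=
  PySem.Set.ofList (S.flatMap (fun p => (lines.filter (fun e => e.1 == p)).map Prod.snd))

-- the set of objects reachable from COM by an orbit path of length exactly m
def orbitFrontier (lines : List (String × String)) : Nat → PySem.Set String
  | 0 => PySem.Set.ofList ["COM"]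
  | m + 1 => orbitNext lines (orbitFrontier lines m)

-- Pre_ = the orbit graph has no cycle reachable from COM (equivalently: the set of objects at
-- distance lines.length + 1 from COM is empty — on a cycle-free graph no path can be longer).
-- These are exactly the inputs on which A's 'while True' loop terminates; on every excluded
-- input A (and B) loops forever.
def Pre_count_orbits (lines : List (String × String)) : Prop :=
  orbitFrontier lines (lines.length + 1) = []
instance (lines : List (String × String)) : Decidable (Pre_count_orbits lines) := by
  unfold Pre_count_orbits; infer_instance

def pvWitness_count_orbits : (List (String × String)) :=
  [("COM", "A"), ("A", "B"), ("COM", "C")]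

def Spec_count_orbits (lines : List (String × String)) (out : Int) : Prop := out = count_orbits_alt lines
instance (lines : List (String × String)) (out : Int) : Decidable (Spec_count_orbits lines out) := by unfold Spec_count_orbits; infer_instance

-- ===== CLAIM (what is proved, stated in full; the proofs are below) =====
def Claim_equal_count_orbits : Prop := ∀ (lines : List (String × String)), Dom_count_orbits lines → Pre_count_orbits lines → Spec_count_orbits lines (count_orbits lines)

-- ===== LEMMAS AND PROOFS =====

-- children of p in the built tree, characterised on the raw edge list
def chl (lines : List (String × String)) (p : String) : List String :=
  (lines.filter (fun e => e.1 == p)).map Prod.snd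

def stepL (lines : List (String × String)) (L : List String) : List String :=
  L.flatMap (chl lines)

def stepP (lines : List (String × String)) (S : List (String × Int)) : List (String × Int) :=
  S.flatMap (fun q => (chl lines q.1).map (fun c => (c, q.2 + 1)))

def iterL (lines : List (String × String)) : Nat → List String → List String
  | 0, L => L
  | m + 1, L => iterL lines m (stepL lines L)

def iterP (lines : List (String × String)) : Nat → List (String × Int) → List (String × Int)
  | 0, S => S
  | m + 1, S => iterP lines m (stepP lines S)

-- Σ_{j<m} (sum of depths of the j-th DFS/BFS frontier)
def SS (lines : List (String × String)) : Nat → List (String × Int) → Int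
  | 0, _ => 0
  | m + 1, S => (S.map Prod.snd).sum + SS lines m (stepP lines S)

-- Σ_{j<m} (size of the j-th frontier) = number of pops remaining
def VP (lines : List (String × String)) : Nat → List (String × Int) → Nat
  | 0, _ => 0
  | m + 1, S => S.length + VP lines m (stepP lines S)

def lv (lines : List (String × String)) (j : Nat) : List String := iterL lines j ["COM"]

lemma tree_getD (lines : List (String × String)) (p : String) :
    (buildTree lines).getD p [] = chl lines p := by
  simp [buildTree, chl, PySem.Dict.getD_foldl_modify_append]

lemma filter_contains (d : PySem.Dict String (List String)) (p : String) :
    (d.getD p []).filter (fun _ => d.contains p) = d.getD p [] := by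
  cases h : d.contains p
  · rw [PySem.Dict.getD_of_not_contains d [] h]; rfl
  · simp

lemma stepP_append (lines : List (String × String)) (A B : List (String × Int)) :
    stepP lines (A ++ B) = stepP lines A ++ stepP lines B := by
  simp [stepP]

lemma stepP_nil (lines : List (String × String)) : stepP lines [] = [] := rfl

lemma iterP_append (lines : List (String × String)) (m : Nat) (A B : List (String × Int)) :
    iterP lines m (A ++ B) = iterP lines m A ++ iterP lines m B := by
  induction m generalizing A B with
  | zero => rfl
  | succ m ih =>
    show iterP lines m (stepP lines (A ++ B)) = _
    rw [stepP_append]; exact ih _ _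

lemma iterP_step_comm (lines : List (String × String)) (m : Nat) (S : List (String × Int)) :
    iterP lines m (stepP lines S) = stepP lines (iterP lines m S) := by
  induction m generalizing S with
  | zero => rfl
  | succ m ih =>
    show iterP lines m (stepP lines (stepP lines S)) = stepP lines (iterP lines m (stepP lines S))
    exact ih _

lemma iterP_empty_succ (lines : List (String × String)) (m : Nat) (S : List (String × Int))
    (h : iterP lines m S = []) : iterP lines m (stepP lines S) = [] := by
  rw [iterP_step_comm, h]; rfl

lemma SS_nil (lines : List (String × String)) (m : Nat) : SS lines m [] = 0 := by
  induction m with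
  | zero => rfl
  | succ m ih => show ([] : List Int).sum + SS lines m (stepP lines []) = 0; rw [stepP_nil, ih]; rfl

lemma SS_append (lines : List (String × String)) (m : Nat) (A B : List (String × Int)) :
    SS lines m (A ++ B) = SS lines m A + SS lines m B := by
  induction m generalizing A B with
  | zero => rfl
  | succ m ih =>
    show ((A ++ B).map Prod.snd).sum + SS lines m (stepP lines (A ++ B)) = _
    rw [stepP_append, ih, List.map_append, List.sum_append]
    show _ = (A.map Prod.snd).sum + SS lines m (stepP lines A) +
      ((B.map Prod.snd).sum + SS lines m (stepP lines B))
    ring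

lemma SS_stable (lines : List (String × String)) (m : Nat) (S : List (String × Int))
    (h : iterP lines m S = []) : SS lines (m + 1) S = SS lines m S := by
  induction m generalizing S with
  | zero => simp only [iterP] at h; subst h; simp [SS]
  | succ m ih =>
    show (S.map Prod.snd).sum + SS lines (m + 1) (stepP lines S) =
      (S.map Prod.snd).sum + SS lines m (stepP lines S)
    rw [ih _ h]

lemma VP_append (lines : List (String × String)) (m : Nat) (A B : List (String × Int)) :
    VP lines m (A ++ B) = VP lines m A + VP lines m B := by
  induction m generalizing A B with
  | zero => rfl
  | succ m ih =>
    show (A ++ B).length + VP lines m (stepP lines (A ++ B)) = _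
    rw [stepP_append, ih, List.length_append]
    show _ = A.length + VP lines m (stepP lines A) + (B.length + VP lines m (stepP lines B))
    omega

lemma VP_stable (lines : List (String × String)) (m : Nat) (S : List (String × Int))
    (h : iterP lines m S = []) : VP lines (m + 1) S = VP lines m S := by
  induction m generalizing S with
  | zero => simp only [iterP] at h; subst h; simp [VP]
  | succ m ih =>
    show S.length + VP lines (m + 1) (stepP lines S) = S.length + VP lines m (stepP lines S)
    rw [ih _ h]

-- the pair frontier over a constant-depth level is the string frontier tagged with the depth
lemma stepP_map (lines : List (String × String)) (L : List String) (d : Int) :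
    stepP lines (L.map (fun q => (q, d))) = (stepL lines L).map (fun q => (q, d + 1)) := by
  simp [stepP, stepL, List.map_flatMap, List.flatMap_map]

lemma iterP_map (lines : List (String × String)) (m : Nat) (L : List String) (d : Int) :
    iterP lines m (L.map (fun q => (q, d))) = (iterL lines m L).map (fun q => (q, d + m)) := by
  induction m generalizing L d with
  | zero => simp [iterP, iterL]
  | succ m ih =>
    show iterP lines m (stepP lines (L.map (fun q => (q, d)))) = _
    rw [stepP_map, ih]
    show (iterL lines m (stepL lines L)).map (fun q => (q, d + 1 + m)) =
      (iterL lines m (stepL lines L)).map (fun q => (q, d + (m + 1)))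
    congr 1; funext q; congr 1; omega

lemma stepP_single (lines : List (String × String)) (p : String) (d : Int) :
    stepP lines [(p, d)] = (chl lines p).map (fun c => (c, d + 1)) := by
  simp [stepP]

-- B's loop computes count + SS
lemma dfs_correct (lines : List (String × String)) (tree : PySem.Dict String (List String))
    (hc : ∀ p, tree.getD p [] = chl lines p) (N : Nat) (hN : 0 < N) :
    ∀ (fuel : Nat) (S : List (String × Int)) (count : Int),
      iterP lines N S = [] → VP lines N S ≤ fuel →
      dfsLoop tree fuel S count = count + SS lines N S := by
  obtain ⟨n, rfl⟩ : ∃ n, N = n + 1 := ⟨N - 1, by omega⟩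
  intro fuel
  induction fuel with
  | zero =>
    intro S count hE hV
    have hS : S = [] := by
      cases S with
      | nil => rfl
      | cons a t => exfalso; simp [VP] at hV
    subst hS
    rw [SS_nil]
    simp [dfsLoop]
  | succ f ih =>
    intro S count hE hV
    cases hg : S.getLast? with
    | none =>
      have hS : S = [] := List.getLast?_eq_none_iff.mp hg
      subst hS
      rw [SS_nil]
      simp [dfsLoop]
    | some q =>
      obtain ⟨node, depth⟩ := q
      obtain ⟨R, rfl⟩ := List.getLast?_eq_some_iff.mp hg
      rw [iterP_append] at hE
      have hR : iterP lines (n + 1) R = [] := List.append_eq_nil_iff.mp hE |>.1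
      have hq : iterP lines (n + 1) [(node, depth)] = [] := List.append_eq_nil_iff.mp hE |>.2
      -- iterP (n+1) [(node,depth)] unfolds to iterP n (stepP [(node,depth)])
      have hstep : iterP lines n (stepP lines [(node, depth)]) = [] := hq
      have hstep1 : iterP lines (n + 1) (stepP lines [(node, depth)]) = [] :=
        iterP_empty_succ lines (n + 1) _ hq
      -- unfold one iteration of the loop
      show dfsLoop tree (f + 1) (R ++ [(node, depth)]) count = _
      rw [show dfsLoop tree (f + 1) (R ++ [(node, depth)]) count =
            dfsLoop tree f ((R ++ [(node, depth)]).dropLast ++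
              (tree.getD node []).map (fun child => (child, depth + 1))) (count + depth) by
          simp [dfsLoop]]
      rw [List.dropLast_concat, hc node]
      have hmap : (chl lines node).map (fun child => (child, depth + 1)) =
          stepP lines [(node, depth)] := (stepP_single lines node depth).symm
      rw [hmap]
      have hE' : iterP lines (n + 1) (R ++ stepP lines [(node, depth)]) = [] := by
        rw [iterP_append, hR, hstep1]; rfl
      have hVq : VP lines (n + 1) [(node, depth)] =
          1 + VP lines (n + 1) (stepP lines [(node, depth)]) := by
        show ([(node, depth)] : List (String × Int)).length + VP lines n (stepP lines [(node, depth)]) = _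
        rw [VP_stable lines n _ hstep]
        simp
      have hV' : VP lines (n + 1) (R ++ stepP lines [(node, depth)]) ≤ f := by
        rw [VP_append] at hV ⊢
        rw [hVq] at hV
        omega
      rw [ih _ _ hE' hV']
      have hSq : SS lines (n + 1) [(node, depth)] =
          depth + SS lines (n + 1) (stepP lines [(node, depth)]) := by
        show (([(node, depth)] : List (String × Int)).map Prod.snd).sum + SS lines n (stepP lines [(node, depth)]) = _
        rw [SS_stable lines n _ hstep]
        simp
      rw [SS_append, SS_append, hSq]
      ring

-- A's loop computes count + SS of the tagged level
lemma bfs_correct (lines : List (String × String)) (tree : PySem.Dict String (List String))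
    (hc : ∀ p, (tree.getD p []).filter (fun _ => tree.contains p) = chl lines p) :
    ∀ (m fuel : Nat) (L : List String) (d count : Int),
      iterL lines m L = [] → m ≤ fuel →
      bfsLoop tree fuel L d count = count + SS lines m (L.map (fun q => (q, d))) := by
  intro m
  induction m with
  | zero =>
    intro fuel L d count hE _
    simp only [iterL] at hE; subst hE
    cases fuel with
    | zero => simp [bfsLoop, SS]
    | succ f => simp [bfsLoop, SS]
  | succ m ih =>
    intro fuel L d count hE hf
    obtain ⟨f, rfl⟩ : ∃ f, fuel = f + 1 := ⟨fuel - 1, by omega⟩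
    have hnext : L.flatMap (fun parent =>
        (tree.getD parent []).filter (fun _ => tree.contains parent)) = stepL lines L := by
      exact List.flatMap_congr (fun p _ => hc p)
    have hSS : SS lines (m + 1) (L.map (fun q => (q, d))) =
        d * (L.length : Int) + SS lines m ((stepL lines L).map (fun q => (q, d + 1))) := by
      show ((L.map (fun q => (q, d))).map Prod.snd).sum + SS lines m (stepP lines (L.map (fun q => (q, d)))) = _
      rw [stepP_map, List.map_map]
      have : ((fun p => Prod.snd p) ∘ (fun q => (q, d))) = fun (_ : String) => d := rfl
      rw [this, PySem.List.sum_map_const_int]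
      ring
    show bfsLoop tree (f + 1) L d count = _
    simp only [bfsLoop, hnext]
    by_cases he : (stepL lines L).isEmpty
    · rw [if_pos he]
      have he' : stepL lines L = [] := List.isEmpty_iff.mp he
      rw [hSS, he']
      rw [show (([] : List String).map (fun q => (q, d + 1))) = ([] : List (String × Int)) from rfl,
        SS_nil]
      ring
    · rw [if_neg he]
      have hE' : iterL lines m (stepL lines L) = [] := hE
      rw [ih f (stepL lines L) (d + 1) (count + d * (L.length : Int)) hE' (by omega), hSS]
      ring

-- ---- graph facts under Pre_ ----

lemma iterL_succ' (lines : List (String × String)) (m : Nat) (L : List String) :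
    iterL lines (m + 1) L = stepL lines (iterL lines m L) := by
  induction m generalizing L with
  | zero => rfl
  | succ m ih =>
    show iterL lines (m + 1) (stepL lines L) = _
    exact ih (stepL lines L)

lemma lv_succ (lines : List (String × String)) (j : Nat) :
    lv lines (j + 1) = stepL lines (lv lines j) := iterL_succ' lines j _

-- the deduplicated frontier of Pre_ has the same members as the raw BFS level
lemma mem_frontier (lines : List (String × String)) (m : Nat) (q : String) :
    q ∈ orbitFrontier lines m ↔ q ∈ lv lines m := by
  induction m generalizing q with
  | zero =>
    show q ∈ PySem.Set.ofList ["COM"] ↔ q ∈ ["COM"]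
    rw [PySem.Set.mem_ofList]
  | succ m ih =>
    show q ∈ orbitNext lines (orbitFrontier lines m) ↔ _
    rw [lv_succ]
    simp only [orbitNext, PySem.Set.mem_ofList, List.mem_flatMap, stepL]
    constructor
    · rintro ⟨p, hp, hq⟩
      exact ⟨p, (ih p).mp hp, hq⟩
    · rintro ⟨p, hp, hq⟩
      exact ⟨p, (ih p).mpr hp, hq⟩

lemma lv_of_pre (lines : List (String × String)) (h : Pre_count_orbits lines) :
    lv lines (lines.length + 1) = [] := by
  rw [List.eq_nil_iff_forall_not_mem]
  intro q hq
  have := (mem_frontier lines (lines.length + 1) q).mpr hq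
  rw [h] at this
  exact absurd this (List.not_mem_nil)

lemma lv_empty_of_le (lines : List (String × String)) {j k : Nat} (hjk : j ≤ k)
    (h : lv lines j = []) : lv lines k = [] := by
  obtain ⟨i, rfl⟩ := Nat.exists_eq_add_of_le hjk
  clear hjk
  induction i with
  | zero => exact h
  | succ i ih =>
    rw [show j + (i + 1) = (j + i) + 1 by omega, lv_succ, ih]
    rfl

-- ---- fuel bound: each frontier grows by a factor ≤ lines.length per step ----

lemma chl_length_le (lines : List (String × String)) (p : String) :
    (chl lines p).length ≤ lines.length := by
  simp only [chl, List.length_map]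
  exact List.length_filter_le _ _

lemma stepP_length_le (lines : List (String × String)) (S : List (String × Int)) :
    (stepP lines S).length ≤ S.length * lines.length := by
  induction S with
  | nil => simp [stepP]
  | cons q T ih =>
    show ((chl lines q.1).map (fun c => (c, q.2 + 1)) ++ stepP lines T).length ≤ _
    rw [List.length_append, List.length_map, List.length_cons]
    have := chl_length_le lines q.1
    calc (chl lines q.1).length + (stepP lines T).length
        ≤ lines.length + T.length * lines.length := by omega
      _ ≤ (T.length + 1) * lines.length := by ring_nf; omega

lemma VP_le (lines : List (String × String)) (m : Nat) (S : List (String × Int)) :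
    VP lines m S ≤ S.length * (lines.length + 2) ^ m := by
  induction m generalizing S with
  | zero => simp [VP]
  | succ m ih =>
    show S.length + VP lines m (stepP lines S) ≤ _
    have h1 := ih (stepP lines S)
    have h2 := stepP_length_le lines S
    have h3 : 1 ≤ (lines.length + 2) ^ m := Nat.one_le_pow _ _ (by omega)
    have h4 : VP lines m (stepP lines S) ≤ S.length * lines.length * (lines.length + 2) ^ m :=
      le_trans h1 (Nat.mul_le_mul_right _ h2)
    have h5 : (lines.length + 2) ^ (m + 1) = (lines.length + 2) ^ m * (lines.length + 2) := by
      ring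
    rw [h5]
    nlinarith

-- ===== VERDICT (by name: the statement is the Claim_ definition above) =====
theorem count_orbits_spec : Claim_equal_count_orbits := by
  intro lines _ hPre
  unfold Spec_count_orbits count_orbits count_orbits_alt
  have hcd : ∀ p, (buildTree lines).getD p [] = chl lines p := tree_getD lines
  have hcf : ∀ p, ((buildTree lines).getD p []).filter
      (fun _ => (buildTree lines).contains p) = chl lines p :=
    fun p => (filter_contains _ p).trans (hcd p)
  have hlv : lv lines (lines.length + 2) = [] :=
    lv_empty_of_le lines (by omega) (lv_of_pre lines hPre)
  have hFuel : lines.length + 2 ≤ (lines.length + 2) ^ (lines.length + 2) :=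
    Nat.le_self_pow (by omega) _
  have hA := bfs_correct lines _ hcf (lines.length + 2)
    ((lines.length + 2) ^ (lines.length + 2)) ["COM"] 0 0 hlv hFuel
  have hEP : iterP lines (lines.length + 2) [("COM", 0)] = [] := by
    rw [show [(("COM" : String), (0 : Int))] = ["COM"].map (fun q => (q, (0 : Int))) from rfl,
      iterP_map]
    have : iterL lines (lines.length + 2) ["COM"] = [] := hlv
    rw [this]
    rfl
  have hVP : VP lines (lines.length + 2) [("COM", 0)] ≤
      (lines.length + 2) ^ (lines.length + 2) := by
    have := VP_le lines (lines.length + 2) [("COM", 0)]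
    simpa using this
  have hB := dfs_correct lines _ hcd (lines.length + 2) (by omega)
    ((lines.length + 2) ^ (lines.length + 2)) [("COM", 0)] 0 hEP hVP
  rw [hA, hB]
  rfl
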